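-- pv_equiv track=rewrite | github.com/greeshman122/Python-code-files | lesson27/main4.py | is_power_of_8
-- ===== SOURCE A (Python) =====
-- def is_power_of_8(n):
--     if n <= 0:
--         return False
--
--     # Check if n is a power of 2
--     if (n & (n - 1)) != 0:
--         return False
--
--     # Check if the only set bit is at a position that is a multiple of 3
--     count = 0
--     while n > 1:
--         n >>= 1
--         count += 1
--
--     return count % 3 == 0
-- ===== SOURCE B (Python) =====
-- def is_power_of_8(n):
--     if n <= 0:
--         return False
--     while n % 8 == 0:
--         n //= 8
--     return n == 1
-- ===== Notes on version B (the rewrite author's own statement) =====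
-- stated objective: simpler
-- what changed: Replaced the power-of-two bitmask test plus bit-position counting (n&(n-1), shift loop, count%3) with direct repeated division by 8 until the base-8 representation is exhausted.
import Mathlib
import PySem

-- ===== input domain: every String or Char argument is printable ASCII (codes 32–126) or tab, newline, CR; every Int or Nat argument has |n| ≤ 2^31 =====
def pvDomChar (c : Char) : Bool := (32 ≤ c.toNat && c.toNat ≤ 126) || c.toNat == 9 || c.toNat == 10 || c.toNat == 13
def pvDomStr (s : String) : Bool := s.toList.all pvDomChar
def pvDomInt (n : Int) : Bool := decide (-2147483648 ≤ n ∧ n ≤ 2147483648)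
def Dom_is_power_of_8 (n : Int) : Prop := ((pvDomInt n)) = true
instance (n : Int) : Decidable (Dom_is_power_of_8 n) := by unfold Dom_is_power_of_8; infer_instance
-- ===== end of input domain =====

-- B replaces A's bitmask power-of-two test and shift-count loop with repeated division by 8 (simpler).


-- ===== PORT A =====
-- A's counting loop: while n > 1: n >>= 1; count += 1
def pvALoop (n : Int) (count : Int) : Int :=
  if 1 < n then pvALoop (n >>> (1 : Nat)) (count + 1) else count
termination_by n.toNat
decreasing_by
  have : n >>> (1 : Nat) = n / 2 := by
    simp [Int.shiftRight_eq_div_pow]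
  omega

def is_power_of_8 (n : Int) : Bool :=
  if n ≤ 0 then false
  else if PySem.Int.band n (n - 1) != 0 then false
  else PySem.Int.mod (pvALoop n 0) 3 == 0

-- ===== PORT B =====
-- B's loop: while n % 8 == 0: n //= 8.  The 'n ≠ 0' conjunct is a totality guard only:
-- B calls this with n > 0, where Python's loop terminates on its own.
def pvBLoop (n : Int) : Int :=
  if n ≠ 0 ∧ PySem.Int.mod n 8 = 0 then pvBLoop (PySem.Int.floordiv n 8) else n
termination_by n.natAbs
decreasing_by
  rename_i h
  obtain ⟨hne, hmod⟩ := h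
  have hdvd : (8:Int) ∣ n := (PySem.Int.mod_eq_zero_iff_dvd n 8).mp hmod
  have hfd : PySem.Int.floordiv n 8 = n / 8 := PySem.Int.floordiv_eq_ediv_of_pos (by norm_num)
  obtain ⟨q, hq⟩ := hdvd
  have hq8 : n / 8 = q := by omega
  rw [hfd, hq8]
  have : q ≠ 0 := by rintro rfl; simp at hq; exact hne hq
  omega

def is_power_of_8_alt (n : Int) : Bool :=
  if n ≤ 0 then false else pvBLoop n == 1

-- ===== PRECONDITION & SPEC =====
def Spec_is_power_of_8 (n : Int) (out : Bool) : Prop := out = is_power_of_8_alt n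
instance (n : Int) (out : Bool) : Decidable (Spec_is_power_of_8 n out) := by unfold Spec_is_power_of_8; infer_instance

-- ===== CLAIM (what is proved, stated in full; the proofs are below) =====
def Claim_equal_is_power_of_8 : Prop := ∀ (n : Int), Dom_is_power_of_8 n → Spec_is_power_of_8 n (is_power_of_8 n)

-- ===== LEMMAS AND PROOFS =====

-- no common set bit ↔ the Nat AND is zero
theorem pv_and_eq_zero_iff (m k : Nat) :
    m &&& k = 0 ↔ ∀ i, ¬(m.testBit i ∧ k.testBit i) := by
  constructor
  · intro h i ⟨hm, hk⟩
    have := congrArg (fun x => x.testBit i) h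
    simp [Nat.testBit_and, hm, hk] at this
  · intro h
    apply Nat.eq_of_testBit_eq
    intro i
    simp only [Nat.testBit_and, Nat.zero_testBit, Bool.and_eq_false_iff]
    by_cases hm : m.testBit i
    · right
      by_cases hk : k.testBit i
      · exact absurd ⟨hm, hk⟩ (h i)
      · simpa using hk
    · left; simpa using hm

-- n & (n-1) == 0 characterises powers of two among the positives
theorem pv_and_pred_iff : ∀ m : Nat, 0 < m → (m &&& (m - 1) = 0 ↔ ∃ j, m = 2 ^ j) := by
  intro m
  induction m using Nat.strong_induction_on with
  | _ m ih =>
    intro hm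
    rcases Nat.lt_or_ge m 2 with h2 | h2
    · interval_cases m
      exact ⟨fun _ => ⟨0, rfl⟩, fun _ => by decide⟩
    · by_cases hodd : m % 2 = 1
      · -- odd, m ≥ 2: both sides false
        constructor
        · intro h
          exfalso
          have ha : 0 < m / 2 := by omega
          obtain ⟨i, hi, _⟩ := Nat.exists_most_significant_bit (n := m / 2) (by omega)
          have hmi : m.testBit (i + 1) = true := by
            rw [Nat.testBit_add_one]; exact hi
          have hpi : (m - 1).testBit (i + 1) = true := by
            rw [Nat.testBit_add_one]
            have : (m - 1) / 2 = m / 2 := by omega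
            rw [this]; exact hi
          exact (pv_and_eq_zero_iff m (m - 1)).mp h (i + 1) ⟨hmi, hpi⟩
        · rintro ⟨j, rfl⟩
          cases j with
          | zero => omega
          | succ j => exfalso; have : 2 ^ (j + 1) % 2 = 0 := by
                        simp [pow_succ]
                      omega
      · -- even, m ≥ 2: reduce to m/2
        have hev : m % 2 = 0 := by omega
        have hhalf : 0 < m / 2 := by omega
        have key : (m &&& (m - 1) = 0) ↔ (m / 2 &&& (m / 2 - 1) = 0) := by
          rw [pv_and_eq_zero_iff, pv_and_eq_zero_iff]
          constructor
          · intro h i ⟨ha, hb⟩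
            apply h (i + 1)
            constructor
            · rw [Nat.testBit_add_one]; exact ha
            · rw [Nat.testBit_add_one]
              have : (m - 1) / 2 = m / 2 - 1 := by omega
              rw [this]; exact hb
          · intro h i ⟨ha, hb⟩
            cases i with
            | zero =>
              have : m.testBit 0 = false := by
                simp [Nat.testBit_zero]; omega
              rw [this] at ha; exact Bool.noConfusion ha
            | succ i =>
              apply h i
              rw [Nat.testBit_add_one] at ha hb
              have : (m - 1) / 2 = m / 2 - 1 := by omega
              rw [this] at hb
              exact ⟨ha, hb⟩
        rw [key, ih (m / 2) (by omega) hhalf]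
        constructor
        · rintro ⟨j, hj⟩
          exact ⟨j + 1, by rw [pow_succ]; omega⟩
        · rintro ⟨j, hj⟩
          cases j with
          | zero => omega
          | succ j => exact ⟨j, by rw [pow_succ] at hj; omega⟩

-- the shift-count loop on a power of two counts its exponent
theorem pv_aloop_pow (j : Nat) : ∀ c : Int, pvALoop ((2 ^ j : Nat) : Int) c = c + j := by
  induction j with
  | zero => intro c; rw [pvALoop]; norm_num
  | succ j ih =>
    intro c
    rw [pvALoop]
    have h1 : (1:Int) < ((2 ^ (j+1) : Nat) : Int) := by
      exact_mod_cast Nat.one_lt_two_pow (by omega)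
    rw [if_pos h1]
    have hs : ((2 ^ (j+1) : Nat) : Int) >>> (1 : Nat) = ((2 ^ j : Nat) : Int) := by
      have hdiv : ((2 ^ (j+1) : Nat) : Int) >>> (1 : Nat) = ((2 ^ (j+1) : Nat) : Int) / 2 := by
        simp [Int.shiftRight_eq_div_pow]
      rw [hdiv]
      push_cast [pow_succ]
      exact Int.mul_ediv_cancel _ (by norm_num)
    rw [hs, ih]
    push_cast; ring

-- B's loop returns 1 exactly on the powers of 8
theorem pv_bloop_one_iff : ∀ m : Nat, 0 < m → (pvBLoop (m : Int) = 1 ↔ ∃ k : Nat, (m : Int) = 8 ^ k) := by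
  intro m
  induction m using Nat.strong_induction_on with
  | _ m ih =>
    intro hm
    rw [pvBLoop]
    by_cases hd : (8 : Nat) ∣ m
    · obtain ⟨q, rfl⟩ := hd
      have hq : 0 < q := by omega
      have hmod : PySem.Int.mod ((8 * q : Nat) : Int) 8 = 0 := by
        rw [PySem.Int.mod_eq_zero_iff_dvd]
        exact ⟨(q : Int), by push_cast; ring⟩
      have hne : ((8 * q : Nat) : Int) ≠ 0 := by positivity
      rw [if_pos ⟨hne, hmod⟩]
      have hfd : PySem.Int.floordiv ((8 * q : Nat) : Int) 8 = (q : Int) := by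
        rw [PySem.Int.floordiv_eq_ediv_of_pos (by norm_num)]
        push_cast; omega
      rw [hfd, ih q (by omega) hq]
      constructor
      · rintro ⟨k, hk⟩
        refine ⟨k + 1, ?_⟩
        push_cast [pow_succ]
        rw [hk]; ring
      · rintro ⟨k, hk⟩
        cases k with
        | zero => exfalso; push_cast at hk; omega
        | succ k =>
          refine ⟨k, ?_⟩
          rw [pow_succ] at hk
          have : (8 : Int) * (q : Int) = 8 ^ k * 8 := by push_cast at hk ⊢; linarith
          linarith
    · have hmod : ¬ (PySem.Int.mod ((m : Nat) : Int) 8 = 0) := by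
        rw [PySem.Int.mod_eq_zero_iff_dvd]
        intro h
        exact hd (by exact_mod_cast h)
      rw [if_neg (by tauto)]
      constructor
      · intro h; exact ⟨0, by simpa using h⟩
      · rintro ⟨k, hk⟩
        cases k with
        | zero => simpa using hk
        | succ k =>
          exfalso
          apply hd
          have : ((8 : Nat) : Int) ∣ (m : Int) := ⟨8 ^ k, by rw [hk, pow_succ]; push_cast; ring⟩
          exact_mod_cast this

-- 2^j is a power of 8 iff 3 ∣ j
theorem pv_pow2_pow8 (j : Nat) : (∃ k : Nat, ((2 ^ j : Nat) : Int) = 8 ^ k) ↔ 3 ∣ j := by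
  constructor
  · rintro ⟨k, hk⟩
    have h8 : ((8 : Int)) ^ k = (((8 : Nat) ^ k : Nat) : Int) := by push_cast; ring
    rw [h8] at hk
    have hn : (2 : Nat) ^ j = 8 ^ k := by exact_mod_cast hk
    have : (8 : Nat) ^ k = 2 ^ (3 * k) := by
      rw [pow_mul]; norm_num
    rw [this] at hn
    have := Nat.pow_right_injective (le_refl 2) hn
    exact ⟨k, this⟩
  · rintro ⟨k, rfl⟩
    refine ⟨k, ?_⟩
    push_cast
    rw [pow_mul]; norm_num

-- ===== VERDICT (by name: the statement is the Claim_ definition above) =====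
theorem is_power_of_8_spec : Claim_equal_is_power_of_8 := by
  unfold Claim_equal_is_power_of_8 Spec_is_power_of_8
  intro n _
  by_cases hn : n ≤ 0
  · simp [is_power_of_8, is_power_of_8_alt, hn]
  · rw [not_le] at hn
    obtain ⟨m, rfl⟩ : ∃ m : Nat, n = (m : Int) := ⟨n.toNat, by omega⟩
    have hm : 0 < m := by exact_mod_cast hn
    have hcast : ((m : Int)) - 1 = ((m - 1 : Nat) : Int) := by omega
    have hband : PySem.Int.band (m : Int) ((m : Int) - 1) = ((m &&& (m - 1) : Nat) : Int) := by
      rw [hcast]; simp [PySem.Int.band_natCast]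
    by_cases hp : ∃ j, m = 2 ^ j
    · obtain ⟨j, rfl⟩ := hp
      have hz : (2 ^ j) &&& (2 ^ j - 1) = 0 := (pv_and_pred_iff _ hm).mpr ⟨j, rfl⟩
      have hbz : (PySem.Int.band ((2 ^ j : Nat) : Int) (((2 ^ j : Nat) : Int) - 1) != 0) = false := by
        rw [hband, hz]; decide
      have hpos : ¬(((2 ^ j : Nat) : Int) ≤ 0) := not_le.mpr hn
      rw [is_power_of_8, is_power_of_8_alt, if_neg hpos, if_neg hpos, hbz]
      simp only [Bool.false_eq_true, if_false]
      have hA : pvALoop ((2 ^ j : Nat) : Int) 0 = (j : Int) := by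
        rw [pv_aloop_pow]; ring
      rw [hA]
      rw [Bool.eq_iff_iff]
      simp only [beq_iff_eq]
      rw [pv_bloop_one_iff _ hm, pv_pow2_pow8, PySem.Int.mod_eq_zero_iff_dvd]
      exact ⟨fun h => by exact_mod_cast h, fun h => by exact_mod_cast h⟩
    · have hz : (m &&& (m - 1)) ≠ 0 := fun h => hp ((pv_and_pred_iff _ hm).mp h)
      have hbz : (PySem.Int.band (m : Int) ((m : Int) - 1) != 0) = true := by
        rw [hband]
        simpa using fun h => hz (by exact_mod_cast h)
      have hpos : ¬(((m : Nat) : Int) ≤ 0) := not_le.mpr hn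
      rw [is_power_of_8, is_power_of_8_alt, if_neg hpos, if_neg hpos, hbz]
      simp only [if_true]
      have hB : pvBLoop (m : Int) ≠ 1 := by
        intro h
        obtain ⟨k, hk⟩ := (pv_bloop_one_iff _ hm).mp h
        apply hp
        refine ⟨3 * k, ?_⟩
        have : ((8 : Int)) ^ k = (((2 : Nat) ^ (3 * k) : Nat) : Int) := by
          push_cast; rw [pow_mul]; norm_num
        rw [this] at hk
        exact_mod_cast hk
      symm
      simpa using hB
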